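-- pv_equiv track=rewrite | github.com/bdenckla/MAM-basics | py/pytmpl_survey/survey_dot.py | _focused_edges
-- ===== SOURCE A (Python) =====
-- def _focused_edges(all_edges, target):
--     """Keep only edges on call chains involving target, plus one level past it."""
--     predecessors = {}
--     successors = {}
--     for caller, callee in all_edges:
--         predecessors.setdefault(callee, set()).add(caller)
--         predecessors.setdefault(caller, set())
--         successors.setdefault(caller, set()).add(callee)
--         successors.setdefault(callee, set())
--     # Find all nodes that can reach target (reverse BFS)
--     before = {target}
--     frontier = [target]
--     while frontier:
--         node = frontier.pop()
--         for pred in predecessors.get(node, ()):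
--             if pred not in before:
--                 before.add(pred)
--                 frontier.append(pred)
--     return {
--         edge: count
--         for edge, count in all_edges.items()
--         if (edge[0] in before and edge[1] in before) or edge[0] == target
--     }
-- ===== SOURCE B (Python) =====
-- def _focused_edges(all_edges, target):
--     """Keep only edges on call chains involving target, plus one level past it.
--
--     B: no adjacency maps, no BFS -- compute the set of nodes that can reach
--     target by repeatedly sweeping the edge list until a sweep adds nothing
--     (at most len(all_edges) sweeps are ever needed)."""
--     before = {target}
--     for _ in range(len(all_edges)):
--         added = False
--         for caller, callee in all_edges:
--             if callee in before and caller not in before: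
--                 before.add(caller)
--                 added = True
--         if not added:
--             break
--     return {
--         edge: count
--         for edge, count in all_edges.items()
--         if (edge[0] in before and edge[1] in before) or edge[0] == target
--     }
-- ===== Notes on version B (the rewrite author's own statement) =====
-- stated objective: simpler
-- what changed: Replaced the predecessors/successors adjacency-map construction and explicit-frontier reverse BFS by a fixpoint sweep over the edge list itself (repeat: add caller when callee already reaches target, until a sweep adds nothing), keeping the identical final dict comprehension.
import Mathlib
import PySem

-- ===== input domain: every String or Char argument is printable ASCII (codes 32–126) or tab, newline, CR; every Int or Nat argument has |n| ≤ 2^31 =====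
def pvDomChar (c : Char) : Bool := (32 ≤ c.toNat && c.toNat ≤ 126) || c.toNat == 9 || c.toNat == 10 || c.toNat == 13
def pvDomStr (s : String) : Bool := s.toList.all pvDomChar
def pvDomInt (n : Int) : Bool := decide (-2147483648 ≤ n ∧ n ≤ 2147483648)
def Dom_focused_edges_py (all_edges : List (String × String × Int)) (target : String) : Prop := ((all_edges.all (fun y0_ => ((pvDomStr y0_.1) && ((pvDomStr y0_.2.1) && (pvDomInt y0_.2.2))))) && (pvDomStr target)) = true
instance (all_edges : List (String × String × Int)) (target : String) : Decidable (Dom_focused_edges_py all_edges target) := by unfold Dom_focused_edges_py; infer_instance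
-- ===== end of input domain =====

-- B replaces A's predecessors/successors adjacency-map construction and explicit-frontier reverse
-- BFS by a fixpoint sweep over the edge list itself (objective: simpler; not faster); the final
-- filtering comprehension is identical.

-- ===== PORT A =====
-- inner loop body: for pred in predecessors.get(node, ()): if pred not in before: add/append
def bfsStep (st : PySem.Set String × List String) (p : String) : PySem.Set String × List String :=
  if PySem.Set.contains st.1 p then st else (PySem.Set.add st.1 p, st.2 ++ [p])

-- while frontier: node = frontier.pop(); … — the fuel argument only makes the while-loop total;
-- each pop either empties the frontier or processes a node, and at most all_edges.length + 1
-- distinct nodes ever enter the frontier, so fuel all_edges.length + 2 is never exhausted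
def bfsA (preds : PySem.Dict String (PySem.Set String)) :
    Nat → PySem.Set String → List String → PySem.Set String
  | 0, before, _ => before
  | fuel+1, before, frontier =>
    match PySem.List.pop? frontier with
    | none => before
    | some (node, rest) =>
      let st := (PySem.Dict.getD preds node PySem.Set.empty).foldl bfsStep (before, rest)
      bfsA preds fuel st.1 st.2

def focused_edges_py (all_edges : List (String × String × Int)) (target : String) : List (String × String × Int) :=
  -- for caller, callee in all_edges: build predecessors and successors (successors stays unused, as in A)
  let ps := all_edges.foldl
    (fun (ps : PySem.Dict String (PySem.Set String) × PySem.Dict String (PySem.Set String)) e =>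
      ( (ps.1.modify e.2.1 PySem.Set.empty (fun s => PySem.Set.add s e.1)).setdefault e.1 PySem.Set.empty,
        (ps.2.modify e.1 PySem.Set.empty (fun s => PySem.Set.add s e.2.1)).setdefault e.2.1 PySem.Set.empty ))
    (PySem.Dict.empty, PySem.Dict.empty)
  let predecessors := ps.1
  let before := bfsA predecessors (all_edges.length + 2) [target] [target]
  all_edges.filter (fun e =>
    (PySem.Set.contains before e.1 && PySem.Set.contains before e.2.1) || e.1 == target)

-- ===== PORT B =====
-- one edge visit of a sweep: if callee in before and caller not in before: add caller, set flag
def bStep (st : PySem.Set String × Bool) (e : String × String × Int) : PySem.Set String × Bool :=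
  if PySem.Set.contains st.1 e.2.1 && !PySem.Set.contains st.1 e.1 then
    (PySem.Set.add st.1 e.1, true)
  else st

-- one sweep: for caller, callee in all_edges: …
def bPass (all_edges : List (String × String × Int)) (st : PySem.Set String × Bool) :
    PySem.Set String × Bool :=
  all_edges.foldl bStep st

-- for _ in range(len(all_edges)): sweep; if not added: break
def bLoop (all_edges : List (String × String × Int)) : Nat → PySem.Set String → PySem.Set String
  | 0, before => before
  | n+1, before =>
    let st := bPass all_edges (before, false)
    if st.2 then bLoop all_edges n st.1 else st.1

def focused_edges_py_alt (all_edges : List (String × String × Int)) (target : String) : List (String × String × Int) :=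
  let before := bLoop all_edges all_edges.length [target]
  all_edges.filter (fun e =>
    (PySem.Set.contains before e.1 && PySem.Set.contains before e.2.1) || e.1 == target)

-- ===== PRECONDITION & SPEC =====
def Spec_focused_edges_py (all_edges : List (String × String × Int)) (target : String) (out : List (String × String × Int)) : Prop := out = focused_edges_py_alt all_edges target
instance (all_edges : List (String × String × Int)) (target : String) (out : List (String × String × Int)) : Decidable (Spec_focused_edges_py all_edges target out) := by unfold Spec_focused_edges_py; infer_instance

-- ===== CLAIM (what is proved, stated in full; the proofs are below) =====
def Claim_equal_focused_edges_py : Prop := ∀ (all_edges : List (String × String × Int)) (target : String), Dom_focused_edges_py all_edges target → Spec_focused_edges_py all_edges target (focused_edges_py all_edges target)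

-- ===== LEMMAS AND PROOFS =====

-- x can reach `target` along the call edges (both `before` sets are exactly this set)
inductive Reach (edges : List (String × String × Int)) (target : String) : String → Prop
  | refl : Reach edges target target
  | step {c d : String} {k : Int} : (c, d, k) ∈ edges → Reach edges target d → Reach edges target c

-- ---- A side: the predecessors dict ----

def predsD (edges : List (String × String × Int)) : PySem.Dict String (PySem.Set String) :=
  edges.foldl
    (fun d e => (d.modify e.2.1 PySem.Set.empty (fun s => PySem.Set.add s e.1)).setdefault e.1 PySem.Set.empty)
    PySem.Dict.empty

lemma fold_pair_fst_gen (all_edges : List (String × String × Int))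
    (a b : PySem.Dict String (PySem.Set String)) :
    (all_edges.foldl
      (fun (ps : PySem.Dict String (PySem.Set String) × PySem.Dict String (PySem.Set String)) e =>
        ( (ps.1.modify e.2.1 PySem.Set.empty (fun s => PySem.Set.add s e.1)).setdefault e.1 PySem.Set.empty,
          (ps.2.modify e.1 PySem.Set.empty (fun s => PySem.Set.add s e.2.1)).setdefault e.2.1 PySem.Set.empty ))
      (a, b)).1 = all_edges.foldl
      (fun d e => (d.modify e.2.1 PySem.Set.empty (fun s => PySem.Set.add s e.1)).setdefault e.1 PySem.Set.empty) a := by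
  induction all_edges generalizing a b with
  | nil => rfl
  | cons e es ih => simp only [List.foldl_cons]; exact ih _ _

lemma fold_pair_fst (all_edges : List (String × String × Int)) :
    (all_edges.foldl
      (fun (ps : PySem.Dict String (PySem.Set String) × PySem.Dict String (PySem.Set String)) e =>
        ( (ps.1.modify e.2.1 PySem.Set.empty (fun s => PySem.Set.add s e.1)).setdefault e.1 PySem.Set.empty,
          (ps.2.modify e.1 PySem.Set.empty (fun s => PySem.Set.add s e.2.1)).setdefault e.2.1 PySem.Set.empty ))
      (PySem.Dict.empty, PySem.Dict.empty)).1 = predsD all_edges := by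
  rw [fold_pair_fst_gen all_edges _ _]; rfl

lemma getD_setdefault_of_ne' {d : PySem.Dict String (PySem.Set String)} {k k' : String} (h : k' ≠ k) (v d0 : PySem.Set String) :
    (d.setdefault k v).getD k' d0 = d.getD k' d0 := by
  by_cases hc : d.contains k
  · rw [PySem.Dict.setdefault_of_contains d v hc]
  · rw [PySem.Dict.setdefault_of_not_contains d v (by simpa using hc), PySem.Dict.getD_insert]
    simp [h]

lemma mem_predsD_gen (edges : List (String × String × Int)) (d : PySem.Dict String (PySem.Set String)) (n c : String) :
    c ∈ (edges.foldl
      (fun d e => (d.modify e.2.1 PySem.Set.empty (fun s => PySem.Set.add s e.1)).setdefault e.1 PySem.Set.empty)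
      d).getD n PySem.Set.empty ↔ c ∈ d.getD n PySem.Set.empty ∨ ∃ k, (c, n, k) ∈ edges := by
  induction edges generalizing d with
  | nil => simp
  | cons e es ih =>
    simp only [List.foldl_cons, ih]
    have hstep : c ∈ ((d.modify e.2.1 PySem.Set.empty (fun s => PySem.Set.add s e.1)).setdefault e.1 PySem.Set.empty).getD n PySem.Set.empty
        ↔ c ∈ d.getD n PySem.Set.empty ∨ (c = e.1 ∧ n = e.2.1) := by
      by_cases h1 : n = e.1
      · rw [h1, PySem.Dict.getD_setdefault_self, PySem.Dict.getD_modify]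
        split_ifs with h2
        · rw [h2, PySem.Set.mem_add]
          tauto
        · tauto
      · rw [getD_setdefault_of_ne' h1 _ _, PySem.Dict.getD_modify]
        split_ifs with h2
        · rw [PySem.Set.mem_add]
          subst h2
          tauto
        · tauto
    rw [hstep]
    constructor
    · rintro (⟨h | ⟨rfl, rfl⟩⟩ | ⟨k, hk⟩)
      · exact Or.inl h
      · exact Or.inr ⟨e.2.2, by simp⟩
      · exact Or.inr ⟨k, by simp [hk]⟩
    · rintro (h | ⟨k, hk⟩)
      · exact Or.inl (Or.inl h)
      · rcases List.mem_cons.1 hk with h | h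
        · left; right
          exact ⟨congrArg Prod.fst h, congrArg (fun p => p.2.1) h⟩
        · exact Or.inr ⟨k, h⟩

lemma mem_predsD (edges : List (String × String × Int)) (n c : String) :
    c ∈ (predsD edges).getD n PySem.Set.empty ↔ ∃ k, (c, n, k) ∈ edges := by
  rw [predsD, mem_predsD_gen]
  simp [PySem.Dict.getD_empty, PySem.Set.empty]

-- ---- A side: the BFS loop ----

-- termination potential of the BFS state: callers not yet visited plus frontier size
def phi (C : List String) (b : PySem.Set String) (fr : List String) : Nat :=
  (C.filter (fun x => !decide (x ∈ b))).length + fr.length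

lemma length_filter_ne_lt (l : List String) (p : String) (hp : p ∈ l) :
    (l.filter (fun x => !decide (x = p))).length < l.length := by
  induction l with
  | nil => cases hp
  | cons x xs ih =>
    by_cases hx : x = p
    · subst hx
      simp only [List.filter_cons, decide_true, Bool.not_true, Bool.false_eq_true, if_false,
        List.length_cons]
      have h := List.length_filter_le (fun y => !decide (y = x)) xs
      omega
    · have hp' : p ∈ xs := by
        rcases List.mem_cons.1 hp with h | h
        · exact absurd h.symm hx
        · exact h
      simp only [List.filter_cons]
      split
      · simpa using Nat.succ_lt_succ (ih hp')
      · exact Nat.lt_of_lt_of_le (ih hp') (Nat.le_succ _)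

lemma filter_add_lt (C : List String) (b : PySem.Set String) (p : String)
    (hpC : p ∈ C) (hpb : p ∉ b) :
    (C.filter (fun x => !decide (x ∈ PySem.Set.add b p))).length + 1
      ≤ (C.filter (fun x => !decide (x ∈ b))).length := by
  have h1 : C.filter (fun x => !decide (x ∈ PySem.Set.add b p))
      = (C.filter (fun x => !decide (x ∈ b))).filter (fun x => !decide (x = p)) := by
    rw [List.filter_filter]
    refine List.filter_congr (fun x _ => ?_)
    by_cases h1 : x = p <;> by_cases h2 : x ∈ b <;>
      simp [PySem.Set.mem_add, h1, h2]
  rw [h1]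
  have hpmem : p ∈ C.filter (fun x => !decide (x ∈ b)) := by
    refine List.mem_filter.2 ⟨hpC, ?_⟩
    simp [hpb]
  exact length_filter_ne_lt _ p hpmem

-- everything the inner for-loop of the BFS guarantees about its final state
lemma procFold_spec (C : List String) (ps : List String) (b : PySem.Set String) (fr : List String)
    (hpsC : ∀ p ∈ ps, p ∈ C) :
    (∀ x ∈ b, x ∈ (ps.foldl bfsStep (b, fr)).1) ∧
    (∀ p ∈ ps, p ∈ (ps.foldl bfsStep (b, fr)).1) ∧
    (∃ extra, (ps.foldl bfsStep (b, fr)).2 = fr ++ extra ∧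
       (∀ x ∈ extra, x ∈ (ps.foldl bfsStep (b, fr)).1) ∧
       (∀ x ∈ extra, x ∈ ps) ∧
       (∀ x ∈ (ps.foldl bfsStep (b, fr)).1, x ∈ b ∨ x ∈ extra)) ∧
    phi C (ps.foldl bfsStep (b, fr)).1 (ps.foldl bfsStep (b, fr)).2 ≤ phi C b fr := by
  induction ps generalizing b fr with
  | nil =>
    refine ⟨fun x h => h, by simp, ⟨[], by simp, by simp, by simp, fun x h => Or.inl h⟩, le_refl _⟩
  | cons p ps ih =>
    have hpsC' : ∀ q ∈ ps, q ∈ C := fun q hq => hpsC q (List.mem_cons_of_mem _ hq)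
    by_cases hm : p ∈ b
    · have hstep : bfsStep (b, fr) p = (b, fr) := by simp [bfsStep, hm]
      simp only [List.foldl_cons, hstep]
      obtain ⟨mono, mem, ⟨extra, hfr, hextra, hextps, hcover⟩, hphi⟩ := ih b fr hpsC'
      refine ⟨mono, ?_, ⟨extra, hfr, hextra,
        fun x hx => List.mem_cons_of_mem _ (hextps x hx), hcover⟩, hphi⟩
      intro q hq
      rcases List.mem_cons.1 hq with rfl | hq'
      · exact mono q hm
      · exact mem q hq'
    · have hstep : bfsStep (b, fr) p = (PySem.Set.add b p, fr ++ [p]) := by simp [bfsStep, hm]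
      simp only [List.foldl_cons, hstep]
      obtain ⟨mono, mem, ⟨extra, hfr, hextra, hextps, hcover⟩, hphi⟩ := ih (PySem.Set.add b p) (fr ++ [p]) hpsC'
      have hmonoadd : ∀ x ∈ b, x ∈ PySem.Set.add b p := fun x hx => (PySem.Set.mem_add b p x).2 (Or.inl hx)
      have hpadd : p ∈ PySem.Set.add b p := (PySem.Set.mem_add b p p).2 (Or.inr rfl)
      refine ⟨fun x hx => mono x (hmonoadd x hx), ?_, ⟨p :: extra, ?_, ?_, ?_, ?_⟩, ?_⟩
      · intro q hq
        rcases List.mem_cons.1 hq with rfl | hq'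
        · exact mono q hpadd
        · exact mem q hq'
      · rw [hfr, List.append_assoc]; rfl
      · intro x hx
        rcases List.mem_cons.1 hx with rfl | hx'
        · exact mono x hpadd
        · exact hextra x hx'
      · intro x hx
        rcases List.mem_cons.1 hx with rfl | hx'
        · exact List.mem_cons_self
        · exact List.mem_cons_of_mem _ (hextps x hx')
      · intro x hx
        rcases hcover x hx with hxb | hxe
        · rcases (PySem.Set.mem_add b p x).1 hxb with hxb' | rfl
          · exact Or.inl hxb'
          · exact Or.inr List.mem_cons_self
        · exact Or.inr (List.mem_cons_of_mem _ hxe)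
      · refine le_trans hphi ?_
        have hlt := filter_add_lt C b p (hpsC p List.mem_cons_self) hm
        unfold phi
        simp only [List.length_append, List.length_cons, List.length_nil]
        omega

lemma bfsA_nil (preds : PySem.Dict String (PySem.Set String)) (fuel : Nat) (b : PySem.Set String) :
    bfsA preds (fuel+1) b [] = b := by
  simp [bfsA, PySem.List.pop?]

lemma bfsA_concat (preds : PySem.Dict String (PySem.Set String)) (fuel : Nat) (b : PySem.Set String)
    (rest : List String) (node : String) :
    bfsA preds (fuel+1) b (rest ++ [node])
      = bfsA preds fuel
          ((PySem.Dict.getD preds node PySem.Set.empty).foldl bfsStep (b, rest)).1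
          ((PySem.Dict.getD preds node PySem.Set.empty).foldl bfsStep (b, rest)).2 := by
  simp only [bfsA, PySem.List.pop?_last]

lemma bfsA_sound (preds : PySem.Dict String (PySem.Set String)) (R : String → Prop)
    (hR : ∀ n c, R n → c ∈ PySem.Dict.getD preds n PySem.Set.empty → R c) :
    ∀ fuel (b : PySem.Set String) (fr : List String), (∀ x ∈ b, R x) → (∀ x ∈ fr, x ∈ b) →
      ∀ x ∈ bfsA preds fuel b fr, R x := by
  intro fuel
  induction fuel with
  | zero => intro b fr hb _ x hx; exact hb x hx
  | succ fuel ih =>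
    intro b fr hb hfrb x hx
    rcases List.eq_nil_or_concat' fr with rfl | ⟨rest, node, rfl⟩
    · rw [bfsA_nil] at hx
      exact hb x hx
    · rw [bfsA_concat] at hx
      set ps := PySem.Dict.getD preds node PySem.Set.empty with hps
      obtain ⟨mono, mem, ⟨extra, hfr, hextra, hextps, hcover⟩, -⟩ :=
        procFold_spec ps ps b rest (fun p h => h)
      have hRnode : R node := hb node (hfrb node (by simp))
      have hRps : ∀ p ∈ ps, R p := fun p hp => hR node p hRnode hp
      have hb' : ∀ y ∈ (ps.foldl bfsStep (b, rest)).1, R y := by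
        intro y hy
        rcases hcover y hy with h | h
        · exact hb y h
        · exact hRps y (hextps y h)
      have hfr' : ∀ y ∈ (ps.foldl bfsStep (b, rest)).2, y ∈ (ps.foldl bfsStep (b, rest)).1 := by
        intro y hy
        rw [hfr] at hy
        rcases List.mem_append.1 hy with h | h
        · exact mono y (hfrb y (List.mem_append.2 (Or.inl h)))
        · exact hextra y h
      exact ih _ _ hb' hfr' x hx

lemma bfsA_closed (preds : PySem.Dict String (PySem.Set String)) (C : List String)
    (hC : ∀ n c, c ∈ PySem.Dict.getD preds n PySem.Set.empty → c ∈ C) :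
    ∀ fuel (b : PySem.Set String) (fr : List String), phi C b fr < fuel → (∀ x ∈ fr, x ∈ b) →
      (∀ n ∈ b, n ∈ fr ∨ ∀ p ∈ PySem.Dict.getD preds n PySem.Set.empty, p ∈ b) →
      (∀ x ∈ b, x ∈ bfsA preds fuel b fr) ∧
      (∀ n ∈ bfsA preds fuel b fr, ∀ p ∈ PySem.Dict.getD preds n PySem.Set.empty,
        p ∈ bfsA preds fuel b fr) := by
  intro fuel
  induction fuel with
  | zero =>
    intro b fr hphi _ _
    exact absurd hphi (Nat.not_lt_zero _)
  | succ fuel ih =>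
    intro b fr hphi hfrb hinv
    rcases List.eq_nil_or_concat' fr with rfl | ⟨rest, node, rfl⟩
    · rw [bfsA_nil]
      refine ⟨fun x h => h, ?_⟩
      intro n hn p hp
      rcases hinv n hn with h | h
      · cases h
      · exact h p hp
    · rw [bfsA_concat]
      set ps := PySem.Dict.getD preds node PySem.Set.empty with hps
      obtain ⟨mono, mem, ⟨extra, hfr, hextra, hextps, hcover⟩, hphile⟩ :=
        procFold_spec C ps b rest (fun p h => hC node p h)
      set st := ps.foldl bfsStep (b, rest) with hst
      have hfr' : ∀ y ∈ st.2, y ∈ st.1 := by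
        intro y hy
        rw [hfr] at hy
        rcases List.mem_append.1 hy with h | h
        · exact mono y (hfrb y (List.mem_append.2 (Or.inl h)))
        · exact hextra y h
      have hphi' : phi C st.1 st.2 < fuel := by
        have h1 : phi C b rest + 1 = phi C b (rest ++ [node]) := by
          unfold phi
          simp only [List.length_append, List.length_cons, List.length_nil]
          omega
        omega
      have hinv' : ∀ n ∈ st.1, n ∈ st.2 ∨ ∀ p ∈ PySem.Dict.getD preds n PySem.Set.empty, p ∈ st.1 := by
        intro n hn
        rcases hcover n hn with hnb | hne
        · rcases hinv n hnb with hnfr | hncl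
          · rcases List.mem_append.1 hnfr with hnr | hnn
            · left
              rw [hfr]
              exact List.mem_append.2 (Or.inl hnr)
            · right
              have : n = node := by simpa using hnn
              subst this
              exact fun p hp => mem p hp
          · exact Or.inr (fun p hp => mono p (hncl p hp))
        · left
          rw [hfr]
          exact List.mem_append.2 (Or.inr hne)
      obtain ⟨ihmono, ihcl⟩ := ih st.1 st.2 hphi' hfr' hinv'
      exact ⟨fun x hx => ihmono x (mono x hx), ihcl⟩

-- A's before-set is exactly the set of nodes reaching target
lemma beforeA_iff (edges : List (String × String × Int)) (target : String) (x : String) :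
    x ∈ bfsA (predsD edges) (edges.length + 2) [target] [target] ↔ Reach edges target x := by
  constructor
  · refine bfsA_sound (predsD edges) (Reach edges target) ?_ (edges.length + 2) [target] [target]
      ?_ (fun y hy => hy) x
    · intro n c hn hc
      obtain ⟨k, hk⟩ := (mem_predsD edges n c).1 hc
      exact Reach.step hk hn
    · intro y hy
      have : y = target := by simpa using hy
      subst this
      exact Reach.refl
  · intro hx
    have hC : ∀ n c, c ∈ PySem.Dict.getD (predsD edges) n PySem.Set.empty
        → c ∈ edges.map (fun e => e.1) := by
      intro n c hc
      obtain ⟨k, hk⟩ := (mem_predsD edges n c).1 hc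
      exact List.mem_map.2 ⟨(c, n, k), hk, rfl⟩
    have hphi : phi (edges.map (fun e => e.1)) [target] [target] < edges.length + 2 := by
      unfold phi
      have h1 := List.length_filter_le (fun x => !decide (x ∈ ([target] : List String)))
        (edges.map (fun e => e.1))
      simp only [List.length_map] at h1
      simp only [List.length_cons, List.length_nil]
      omega
    obtain ⟨hmono, hclosed⟩ := bfsA_closed (predsD edges) (edges.map (fun e => e.1)) hC
      (edges.length + 2) [target] [target] hphi (fun y hy => hy)
      (fun n hn => Or.inl hn)
    induction hx with
    | refl => exact hmono target (by simp)
    | step he _ ihr =>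
      exact hclosed _ ihr _ ((mem_predsD edges _ _).2 ⟨_, he⟩)

-- ---- B side ----

lemma bStep_true {st : PySem.Set String × Bool} {e : String × String × Int}
    (h : e.2.1 ∈ st.1) (h2 : e.1 ∉ st.1) :
    bStep st e = (PySem.Set.add st.1 e.1, true) := by
  simp [bStep, h, h2]

lemma bStep_false {st : PySem.Set String × Bool} {e : String × String × Int}
    (h : ¬(e.2.1 ∈ st.1 ∧ e.1 ∉ st.1)) : bStep st e = st := by
  unfold bStep
  by_cases h1 : e.2.1 ∈ st.1 <;> by_cases h2 : e.1 ∈ st.1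
  · simp [h1, h2]
  · exact absurd ⟨h1, h2⟩ h
  · simp [h1, h2]
  · simp [h1, h2]

lemma bfold_mono (l : List (String × String × Int)) :
    ∀ (st : PySem.Set String × Bool), ∀ x ∈ st.1, x ∈ (l.foldl bStep st).1 := by
  induction l with
  | nil => exact fun st x hx => hx
  | cons e es ih =>
    intro st x hx
    simp only [List.foldl_cons]
    by_cases h : e.2.1 ∈ st.1 ∧ e.1 ∉ st.1
    · rw [bStep_true h.1 h.2]
      exact ih _ x ((PySem.Set.mem_add _ _ _).2 (Or.inl hx))
    · rw [bStep_false h]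
      exact ih _ x hx

lemma bfold_sound (edges : List (String × String × Int)) (target : String)
    (l : List (String × String × Int)) (hl : ∀ e ∈ l, e ∈ edges) :
    ∀ (st : PySem.Set String × Bool), (∀ x ∈ st.1, Reach edges target x) →
      ∀ x ∈ (l.foldl bStep st).1, Reach edges target x := by
  induction l with
  | nil => exact fun st h => h
  | cons e es ih =>
    intro st hst
    simp only [List.foldl_cons]
    refine ih (fun q hq => hl q (List.mem_cons_of_mem _ hq)) _ ?_
    by_cases h : e.2.1 ∈ st.1 ∧ e.1 ∉ st.1
    · rw [bStep_true h.1 h.2]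
      intro x hx
      rcases (PySem.Set.mem_add _ _ _).1 hx with hx' | rfl
      · exact hst x hx'
      · exact Reach.step (show (e.1, e.2.1, e.2.2) ∈ edges by
          simpa using hl e List.mem_cons_self) (hst _ h.1)
    · rw [bStep_false h]
      exact hst

lemma bfold_flag_mono (l : List (String × String × Int)) :
    ∀ (st : PySem.Set String × Bool), st.2 = true → (l.foldl bStep st).2 = true := by
  induction l with
  | nil => exact fun st h => h
  | cons e es ih =>
    intro st h
    simp only [List.foldl_cons]
    by_cases hc : e.2.1 ∈ st.1 ∧ e.1 ∉ st.1
    · rw [bStep_true hc.1 hc.2]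
      exact ih _ rfl
    · rw [bStep_false hc]
      exact ih _ h

lemma bfold_false (l : List (String × String × Int)) :
    ∀ (st : PySem.Set String × Bool), (l.foldl bStep st).2 = false →
      (l.foldl bStep st).1 = st.1 ∧ ∀ e ∈ l, ¬(e.2.1 ∈ st.1 ∧ e.1 ∉ st.1) := by
  induction l with
  | nil => exact fun st _ => ⟨rfl, by simp⟩
  | cons e es ih =>
    intro st hres
    simp only [List.foldl_cons] at hres ⊢
    by_cases hc : e.2.1 ∈ st.1 ∧ e.1 ∉ st.1
    · rw [bStep_true hc.1 hc.2] at hres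
      rw [bfold_flag_mono es _ rfl] at hres
      cases hres
    · rw [bStep_false hc] at hres ⊢
      obtain ⟨heq, hcond⟩ := ih st hres
      refine ⟨heq, ?_⟩
      intro f hf
      rcases List.mem_cons.1 hf with rfl | hf'
      · exact hc
      · exact hcond f hf'

lemma bfold_nodup (l : List (String × String × Int)) :
    ∀ (st : PySem.Set String × Bool), st.1.Nodup → (l.foldl bStep st).1.Nodup := by
  induction l with
  | nil => exact fun st h => h
  | cons e es ih =>
    intro st h
    simp only [List.foldl_cons]
    by_cases hc : e.2.1 ∈ st.1 ∧ e.1 ∉ st.1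
    · rw [bStep_true hc.1 hc.2]
      exact ih _ (PySem.Set.nodup_add _ _ h)
    · rw [bStep_false hc]
      exact ih _ h

lemma bfold_subset (L : List String) (l : List (String × String × Int))
    (hcallers : ∀ e ∈ l, e.1 ∈ L) :
    ∀ (st : PySem.Set String × Bool), (∀ x ∈ st.1, x ∈ L) →
      ∀ x ∈ (l.foldl bStep st).1, x ∈ L := by
  induction l with
  | nil => exact fun st h => h
  | cons e es ih =>
    intro st hst
    simp only [List.foldl_cons]
    refine ih (fun q hq => hcallers q (List.mem_cons_of_mem _ hq)) _ ?_
    by_cases hc : e.2.1 ∈ st.1 ∧ e.1 ∉ st.1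
    · rw [bStep_true hc.1 hc.2]
      intro x hx
      rcases (PySem.Set.mem_add _ _ _).1 hx with hx' | rfl
      · exact hst x hx'
      · exact hcallers e List.mem_cons_self
    · rw [bStep_false hc]
      exact hst

lemma bfold_len_mono (l : List (String × String × Int)) :
    ∀ (st : PySem.Set String × Bool), st.1.length ≤ (l.foldl bStep st).1.length := by
  induction l with
  | nil => exact fun st => le_refl _
  | cons e es ih =>
    intro st
    simp only [List.foldl_cons]
    by_cases hc : e.2.1 ∈ st.1 ∧ e.1 ∉ st.1
    · rw [bStep_true hc.1 hc.2]
      refine le_trans ?_ (ih _)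
      have : PySem.Set.add st.1 e.1 = st.1 ++ [e.1] := by
        simp [PySem.Set.add, hc.2]
      rw [this]
      simp
    · rw [bStep_false hc]
      exact ih _

lemma bfold_progress (l : List (String × String × Int)) :
    ∀ (st : PySem.Set String × Bool), st.2 = false → (l.foldl bStep st).2 = true →
      st.1.length < (l.foldl bStep st).1.length := by
  induction l with
  | nil =>
    intro st h1 h2
    rw [List.foldl_nil] at h2
    rw [h1] at h2
    cases h2
  | cons e es ih =>
    intro st h1 h2
    simp only [List.foldl_cons] at h2 ⊢
    by_cases hc : e.2.1 ∈ st.1 ∧ e.1 ∉ st.1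
    · rw [bStep_true hc.1 hc.2]
      have hadd : PySem.Set.add st.1 e.1 = st.1 ++ [e.1] := by
        simp [PySem.Set.add, hc.2]
      have := bfold_len_mono es (PySem.Set.add st.1 e.1, true)
      simp only [hadd, List.length_append, List.length_cons, List.length_nil] at this ⊢
      omega
    · rw [bStep_false hc] at h2 ⊢
      exact ih st h1 h2

lemma bLoop_mono (edges : List (String × String × Int)) :
    ∀ (n : Nat) (S : PySem.Set String), ∀ x ∈ S, x ∈ bLoop edges n S := by
  intro n
  induction n with
  | zero => exact fun S x hx => hx
  | succ n ih =>
    intro S x hx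
    simp only [bLoop]
    split
    · exact ih _ x (bfold_mono edges _ x hx)
    · exact bfold_mono edges _ x hx

lemma bLoop_sound (edges : List (String × String × Int)) (target : String) :
    ∀ (n : Nat) (S : PySem.Set String), (∀ x ∈ S, Reach edges target x) →
      ∀ x ∈ bLoop edges n S, Reach edges target x := by
  intro n
  induction n with
  | zero => exact fun S h => h
  | succ n ih =>
    intro S hS
    simp only [bLoop]
    split
    · exact ih _ (bfold_sound edges target edges (fun e he => he) _ hS)
    · exact bfold_sound edges target edges (fun e he => he) _ hS

lemma bLoop_closed (edges : List (String × String × Int)) (t : String) :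
    ∀ (n : Nat) (S : PySem.Set String), S.Nodup →
      (∀ x ∈ S, x ∈ t :: edges.map (fun e => e.1)) →
      edges.length + 1 ≤ n + S.length →
      ∀ e ∈ edges, e.2.1 ∈ bLoop edges n S → e.1 ∈ bLoop edges n S := by
  intro n
  induction n with
  | zero =>
    intro S hnd hsub hlen e he _
    -- if no sweeps remain, S already exhausts target :: callers, so every caller is in S
    have hsubf : S.toFinset ⊆ (t :: edges.map (fun e => e.1)).toFinset := by
      intro y hy
      exact List.mem_toFinset.2 (hsub y (List.mem_toFinset.1 hy))
    have hcard : (t :: edges.map (fun e => e.1)).toFinset.card ≤ S.toFinset.card := by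
      have h1 : S.toFinset.card = S.length := by
        rw [List.toFinset_card_of_nodup hnd]
      have h2 : (t :: edges.map (fun e => e.1)).toFinset.card
          ≤ (t :: edges.map (fun e => e.1)).length := List.toFinset_card_le _
      simp only [List.length_cons, List.length_map] at h2
      omega
    have this : e.1 ∈ S := by
      have h1 : e.1 ∈ (t :: edges.map (fun e => e.1)).toFinset := by
        refine List.mem_toFinset.2 (List.mem_cons_of_mem _ ?_)
        exact List.mem_map.2 ⟨e, he, rfl⟩
      have heqf := Finset.eq_of_subset_of_card_le hsubf hcard
      rw [← heqf] at h1
      exact List.mem_toFinset.1 h1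
    simpa [bLoop] using this
  | succ n ih =>
    intro S hnd hsub hlen e he
    simp only [bLoop, bPass]
    split
    · next hflag =>
      refine ih _ (bfold_nodup edges _ hnd) ?_ ?_ e he
      · refine bfold_subset _ edges (fun f hf => ?_) _ hsub
        exact List.mem_cons_of_mem _ (List.mem_map.2 ⟨f, hf, rfl⟩)
      · have hprog := bfold_progress edges (S, false) rfl hflag
        simp only at hprog
        omega
    · next hflag =>
      intro hmem
      have hflag' : (edges.foldl bStep (S, false)).2 = false := by
        simpa using hflag
      obtain ⟨heq, hcond⟩ := bfold_false edges (S, false) hflag'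
      rw [heq] at hmem ⊢
      by_contra hnotin
      exact hcond e he ⟨hmem, hnotin⟩

-- B's before-set is also exactly the set of nodes reaching target
lemma beforeB_iff (edges : List (String × String × Int)) (target : String) (x : String) :
    x ∈ bLoop edges edges.length [target] ↔ Reach edges target x := by
  constructor
  · refine bLoop_sound edges target edges.length [target] ?_ x
    intro y hy
    have : y = target := by simpa using hy
    subst this
    exact Reach.refl
  · intro hx
    induction hx with
    | refl => exact bLoop_mono edges _ [target] target (by simp)
    | step he _ ihr =>
      exact bLoop_closed edges target edges.length [target] (by simp) (by simp)
        (by simp) _ he ihr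

-- ===== VERDICT (by name: the statement is the Claim_ definition above) =====
theorem focused_edges_py_spec : Claim_equal_focused_edges_py := by
  intro all_edges target _
  unfold Spec_focused_edges_py
  show all_edges.filter _ = all_edges.filter _
  rw [show (all_edges.foldl
      (fun (ps : PySem.Dict String (PySem.Set String) × PySem.Dict String (PySem.Set String)) e =>
        ( (ps.1.modify e.2.1 PySem.Set.empty (fun s => PySem.Set.add s e.1)).setdefault e.1 PySem.Set.empty,
          (ps.2.modify e.1 PySem.Set.empty (fun s => PySem.Set.add s e.2.1)).setdefault e.2.1 PySem.Set.empty ))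
      (PySem.Dict.empty, PySem.Dict.empty)).1 = predsD all_edges from fold_pair_fst all_edges]
  have hmem : ∀ x, PySem.Set.contains
        (bfsA (predsD all_edges) (all_edges.length + 2) [target] [target]) x
      = PySem.Set.contains (bLoop all_edges all_edges.length [target]) x := by
    intro x
    by_cases h : Reach all_edges target x
    · have h1 := (beforeA_iff all_edges target x).2 h
      have h2 := (beforeB_iff all_edges target x).2 h
      simp [h1, h2]
    · have h1 : x ∉ bfsA (predsD all_edges) (all_edges.length + 2) [target] [target] :=
        fun hx => h ((beforeA_iff all_edges target x).1 hx)
      have h2 : x ∉ bLoop all_edges all_edges.length [target] :=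
        fun hx => h ((beforeB_iff all_edges target x).1 hx)
      simp [h1, h2]
  refine List.filter_congr (fun e _ => ?_)
  rw [hmem e.1, hmem e.2.1]
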